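-- pv_equiv track=rewrite | github.com/TheDukeVin/AMP | conform/conform.py | please_flip_original
-- ===== SOURCE A (Python) =====
-- def please_flip_original(caps):
--   intervals = []
--   interval_start = 0
--   forward_count = backward_count = 0
--   shouts = []
--
--   #Step 1: Determine intervals where hats face the same direction
--   for i in range(1, len(caps)):
--     if caps[interval_start] != caps[i]:
--       intervals.append((interval_start, i - 1, caps[interval_start])) #(start, end, direction)
--
--       if caps[interval_start] == 'F':
--         forward_count += 1
--       else:
--         backward_count += 1
--       interval_start = i   #new hat direction->new interval start
--
--   intervals.append((interval_start, len(caps)-1, caps[interval_start]))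
--   if caps[interval_start] == 'F':
--     forward_count += 1
--   else:
--     backward_count += 1
--
--   #Step 2: Decide which way to flip based on hat direction with least number of intervals
--   if forward_count < backward_count:
--     flip_direction = 'F'
--   else:
--     flip_direction = 'B'
--
--   #Step 3: Flip all of the intervals that match with the flip direction
--   for t in intervals:
--     if t[2] == flip_direction:
--         if t[0] == t[1]:
--             shouts.append(f"Person in position {str(t[0])} flip your cap!")
--         else:
--             shouts.append(f"People in positions {str(t[0])} through {str(t[1])} flip your caps!")
--   return shouts
-- ===== SOURCE B (Python) =====
-- def please_flip_original(caps):
--     n = len(caps)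
--     runs = sum(1 for i in range(n) if i == 0 or caps[i] != caps[i - 1])
--     fwd = sum(1 for i in range(n)
--               if (i == 0 or caps[i] != caps[i - 1]) and caps[i] == 'F')
--     flip = 'F' if fwd < runs - fwd else 'B'
--     starts = [i for i in range(n)
--               if caps[i] == flip and (i == 0 or caps[i - 1] != flip)]
--     ends = [i for i in range(n)
--             if caps[i] == flip and (i == n - 1 or caps[i + 1] != flip)]
--     return [f"Person in position {s} flip your cap!" if s == e
--             else f"People in positions {s} through {e} flip your caps!"
--             for s, e in zip(starts, ends)]
-- ===== Notes on version B (the rewrite author's own statement) =====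
-- stated objective: alternative
-- what changed: B never builds the run/interval list at all: it picks the flip direction by a counting formula over run-start indicators, then recovers exactly the flip-coloured segments by two local neighbour tests (segment starts where caps[i]==flip and left neighbour differs, segment ends where right neighbour differs) and zips the starts with the ends, instead of A's stateful loop that accumulates all intervals with running counters and then filters them.
import Mathlib
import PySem

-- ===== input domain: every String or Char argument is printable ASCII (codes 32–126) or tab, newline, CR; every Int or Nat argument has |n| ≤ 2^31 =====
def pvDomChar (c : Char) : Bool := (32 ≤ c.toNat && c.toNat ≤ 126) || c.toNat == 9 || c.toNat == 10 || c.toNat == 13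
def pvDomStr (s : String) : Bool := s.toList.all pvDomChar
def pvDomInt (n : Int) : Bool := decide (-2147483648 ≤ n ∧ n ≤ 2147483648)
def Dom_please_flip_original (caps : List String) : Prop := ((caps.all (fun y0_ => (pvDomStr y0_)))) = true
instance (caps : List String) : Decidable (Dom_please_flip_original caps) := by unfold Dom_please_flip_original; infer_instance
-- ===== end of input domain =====

-- B drops A's interval-accumulating loop: flip direction from a run-start counting formula, then the
-- flip-coloured segments recovered by local neighbour tests and zipped; objective: alternative (same cost).
-- ===== PORT A =====
-- loop body of A's Step 1; all indices reached are < caps.length, so getD is exact there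
def pvStepA (caps : List String) (st : List (Nat × Nat × String) × Nat × Nat × Nat) (i : Nat) :
    List (Nat × Nat × String) × Nat × Nat × Nat :=
  if caps.getD st.2.1 "" ≠ caps.getD i "" then
    if caps.getD st.2.1 "" = "F" then
      (st.1 ++ [(st.2.1, i - 1, caps.getD st.2.1 "")], i, st.2.2.1 + 1, st.2.2.2)
    else
      (st.1 ++ [(st.2.1, i - 1, caps.getD st.2.1 "")], i, st.2.2.1, st.2.2.2 + 1)
  else st

-- loop body of A's Step 3
def pvEmitA (flip : String) (shouts : List String) (t : Nat × Nat × String) : List String :=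
  if t.2.2 = flip then
    if t.1 = t.2.1 then
      shouts ++ ["Person in position " ++ PySem.Int.toStr (t.1 : Int) ++ " flip your cap!"]
    else
      shouts ++ ["People in positions " ++ PySem.Int.toStr (t.1 : Int) ++ " through " ++
        PySem.Int.toStr (t.2.1 : Int) ++ " flip your caps!"]
  else shouts

def please_flip_original (caps : List String) : List String :=
  let n := caps.length
  let st := ((List.range n).drop 1).foldl (pvStepA caps) ([], 0, 0, 0)
  let intervals := st.1 ++ [(st.2.1, n - 1, caps.getD st.2.1 "")]
  let fc := if caps.getD st.2.1 "" = "F" then st.2.2.1 + 1 else st.2.2.1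
  let bc := if caps.getD st.2.1 "" = "F" then st.2.2.2 else st.2.2.2 + 1
  let flip := if fc < bc then "F" else "B"
  intervals.foldl (pvEmitA flip) []

-- ===== PORT B =====
-- the comprehension's expression in B's final line
def pvFmt (se : Nat × Nat) : String :=
  if se.1 = se.2 then
    "Person in position " ++ PySem.Int.toStr (se.1 : Int) ++ " flip your cap!"
  else
    "People in positions " ++ PySem.Int.toStr (se.1 : Int) ++ " through " ++
      PySem.Int.toStr (se.2 : Int) ++ " flip your caps!"

def please_flip_original_alt (caps : List String) : List String :=
  let n := caps.length
  let runs := ((List.range n).filter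
      (fun i => i = 0 ∨ caps.getD i "" ≠ caps.getD (i - 1) "")).length
  let fwd := ((List.range n).filter
      (fun i => (i = 0 ∨ caps.getD i "" ≠ caps.getD (i - 1) "") ∧ caps.getD i "" = "F")).length
  let flip := if fwd < runs - fwd then "F" else "B"
  let starts := (List.range n).filter
      (fun i => caps.getD i "" = flip ∧ (i = 0 ∨ caps.getD (i - 1) "" ≠ flip))
  let ends := (List.range n).filter
      (fun i => caps.getD i "" = flip ∧ (i = n - 1 ∨ caps.getD (i + 1) "" ≠ flip))
  (starts.zip ends).map pvFmt

-- ===== PRECONDITION & SPEC =====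
-- Pre_ excludes only the empty list, on which A raises IndexError (caps[interval_start]).
def Pre_please_flip_original (caps : List String) : Prop := caps ≠ []
instance (caps : List String) : Decidable (Pre_please_flip_original caps) := by unfold Pre_please_flip_original; infer_instance
def pvWitness_please_flip_original : List String := ["F", "B", "B"]

def Spec_please_flip_original (caps : List String) (out : List String) : Prop := out = please_flip_original_alt caps
instance (caps : List String) (out : List String) : Decidable (Spec_please_flip_original caps out) := by unfold Spec_please_flip_original; infer_instance

-- ===== CLAIM (what is proved, stated in full; the proofs are below) =====
def Claim_equal_please_flip_original : Prop := ∀ (caps : List String), Dom_please_flip_original caps → Pre_please_flip_original caps → Spec_please_flip_original caps (please_flip_original caps)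

-- ===== LEMMAS AND PROOFS =====

-- the boundary indices among 1..k (indices where the cap differs from its left neighbour)
def pvBnds (caps : List String) (k : Nat) : List Nat :=
  ((List.range (k + 1)).drop 1).filter (fun i => caps.getD i "" ≠ caps.getD (i - 1) "")

-- the intervals determined by a list of boundary positions
def pvIvals (caps : List String) : List Nat → List (Nat × Nat × String)
  | b0 :: b1 :: rest => (b0, b1 - 1, caps.getD b0 "") :: pvIvals caps (b1 :: rest)
  | _ => []

-- last element of a :: l
def pvLast (a : Nat) : List Nat → Nat
  | [] => a
  | x :: xs => pvLast x xs

theorem pvLast_append (a b : Nat) : ∀ l : List Nat, pvLast a (l ++ [b]) = b := by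
  intro l
  induction l generalizing a with
  | nil => rfl
  | cons x xs ih => exact ih x

theorem pvLast_decomp (a : Nat) : ∀ l : List Nat, a :: l = (a :: l).dropLast ++ [pvLast a l] := by
  intro l
  induction l generalizing a with
  | nil => rfl
  | cons x xs ih => simpa using congrArg (List.cons a) (ih x)

theorem pvIvals_append (caps : List String) :
    ∀ (l : List Nat) (a b : Nat),
      pvIvals caps ((a :: l) ++ [b]) =
        pvIvals caps (a :: l) ++ [(pvLast a l, b - 1, caps.getD (pvLast a l) "")] := by
  intro l
  induction l with
  | nil => intro a b; rfl
  | cons x xs ih =>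
    intro a b
    show (a, x - 1, caps.getD a "") :: pvIvals caps ((x :: xs) ++ [b]) = _
    rw [ih x b]
    rfl

theorem pvRange_drop_succ (k : Nat) :
    (List.range (k + 2)).drop 1 = (List.range (k + 1)).drop 1 ++ [k + 1] := by
  rw [List.range_succ, List.drop_append_of_le_length (by simp)]

theorem pvBnds_succ (caps : List String) (k : Nat) :
    pvBnds caps (k + 1) =
      pvBnds caps k ++ (if caps.getD (k + 1) "" ≠ caps.getD k "" then [k + 1] else []) := by
  unfold pvBnds
  rw [pvRange_drop_succ, List.filter_append]
  by_cases h : caps[k + 1]?.getD "" = caps[k]?.getD "" <;>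
    simp [List.filter_nil, h]

-- A's Step-1 loop, folded over range(1, k+1), expressed through the boundary list
theorem pvLoopA (caps : List String) : ∀ k : Nat,
    ((List.range (k + 1)).drop 1).foldl (pvStepA caps) ([], 0, 0, 0) =
      (pvIvals caps (0 :: pvBnds caps k),
       pvLast 0 (pvBnds caps k),
       ((0 :: pvBnds caps k).dropLast.filter (fun s => caps.getD s "" = "F")).length,
       ((0 :: pvBnds caps k).dropLast.filter (fun s => ¬ (caps.getD s "" = "F"))).length)
    ∧ caps.getD (pvLast 0 (pvBnds caps k)) "" = caps.getD k "" := by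
  intro k
  induction k with
  | zero => simp [pvBnds, pvIvals, pvLast, List.range_one]
  | succ k ih =>
    obtain ⟨hfold, hinv⟩ := ih
    rw [pvRange_drop_succ, List.foldl_append, hfold]
    rw [pvBnds_succ caps k]
    by_cases h : caps.getD (k + 1) "" = caps.getD k ""
    · have he : caps.getD (pvLast 0 (pvBnds caps k)) "" = caps.getD (k + 1) "" := by
        rw [hinv, h]
      rw [if_neg (not_not_intro h)]
      rw [List.append_nil]
      refine ⟨?_, by rw [hinv, h]⟩
      show pvStepA caps _ (k + 1) = _
      unfold pvStepA
      rw [if_neg (fun hne => hne he)]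
    · have hcond : caps.getD (pvLast 0 (pvBnds caps k)) "" ≠ caps.getD (k + 1) "" := by
        rw [hinv]; exact fun he => h he.symm
      rw [if_pos (by simpa using h)]
      have hIv : pvIvals caps (0 :: (pvBnds caps k ++ [k + 1])) =
          pvIvals caps (0 :: pvBnds caps k) ++
            [(pvLast 0 (pvBnds caps k), k + 1 - 1, caps.getD (pvLast 0 (pvBnds caps k)) "")] :=
        pvIvals_append caps (pvBnds caps k) 0 (k + 1)
      have hdl : (0 :: (pvBnds caps k ++ [k + 1])).dropLast = 0 :: pvBnds caps k := by
        rw [show (0 :: (pvBnds caps k ++ [k + 1])) = (0 :: pvBnds caps k) ++ [k + 1] from rfl,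
          List.dropLast_concat]
      have hlast2 : pvLast 0 (pvBnds caps k ++ [k + 1]) = k + 1 := pvLast_append 0 (k + 1) _
      have hdec := pvLast_decomp 0 (pvBnds caps k)
      refine ⟨?_, by rw [hlast2]⟩
      show pvStepA caps _ (k + 1) = _
      unfold pvStepA
      rw [if_pos hcond]
      by_cases hf : caps.getD (pvLast 0 (pvBnds caps k)) "" = "F"
      · have hf' : caps[pvLast 0 (pvBnds caps k)]?.getD "" = "F" := hf
        rw [if_pos hf]
        have hFcnt : ((0 :: pvBnds caps k).filter (fun s => caps.getD s "" = "F")).length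
            = ((0 :: pvBnds caps k).dropLast.filter
                (fun s => caps.getD s "" = "F")).length + 1 := by
          conv_lhs => rw [hdec]
          simp [List.filter_append, hf']
        have hNcnt : ((0 :: pvBnds caps k).filter (fun s => ¬ (caps.getD s "" = "F"))).length
            = ((0 :: pvBnds caps k).dropLast.filter
                (fun s => ¬ (caps.getD s "" = "F"))).length := by
          conv_lhs => rw [hdec]
          simp [List.filter_append, hf']
        rw [hIv, hlast2, hdl, hFcnt, hNcnt]
      · have hf' : ¬ caps[pvLast 0 (pvBnds caps k)]?.getD "" = "F" := hf
        rw [if_neg hf]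
        have hFcnt : ((0 :: pvBnds caps k).filter (fun s => caps.getD s "" = "F")).length
            = ((0 :: pvBnds caps k).dropLast.filter
                (fun s => caps.getD s "" = "F")).length := by
          conv_lhs => rw [hdec]
          simp [List.filter_append, hf']
        have hNcnt : ((0 :: pvBnds caps k).filter (fun s => ¬ (caps.getD s "" = "F"))).length
            = ((0 :: pvBnds caps k).dropLast.filter
                (fun s => ¬ (caps.getD s "" = "F"))).length + 1 := by
          conv_lhs => rw [hdec]
          simp [List.filter_append, hf']
        rw [hIv, hlast2, hdl, hFcnt, hNcnt]

theorem pvFilter_split (caps : List String) : ∀ l : List Nat,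
    (l.filter (fun s => caps.getD s "" = "F")).length
      + (l.filter (fun s => ¬ (caps.getD s "" = "F"))).length = l.length := by
  intro l
  induction l with
  | nil => rfl
  | cons x xs ih =>
    by_cases h : caps[x]?.getD "" = "F" <;> simp [h, ← ih] <;> omega

-- generic: filter after map = map after composed filter
theorem pvFilterMap (f : Nat → Nat) (p : Nat → Bool) :
    ∀ l : List Nat, (l.map f).filter p = (l.filter (fun a => p (f a))).map f := by
  intro l
  induction l with
  | nil => rfl
  | cons x xs ih =>
    by_cases h : p (f x) <;> simp [h, ih]

-- B's run-start indices are exactly 0 followed by the boundary indices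
theorem pvStarts (caps : List String) : ∀ m : Nat,
    (List.range (m + 1)).filter
      (fun i => i = 0 ∨ caps.getD i "" ≠ caps.getD (i - 1) "") = 0 :: pvBnds caps m := by
  intro m
  induction m with
  | zero => simp [pvBnds, List.range_one]
  | succ m ih =>
    rw [List.range_succ, List.filter_append, ih, pvBnds_succ]
    by_cases h : caps[m + 1]?.getD "" = caps[m]?.getD "" <;> simp [h]

-- B's run-end indices are exactly the boundary indices (and the length) shifted one left
theorem pvEnds (caps : List String) : ∀ m : Nat,
    (List.range (m + 1)).filter
      (fun i => i = m ∨ caps.getD (i + 1) "" ≠ caps.getD i "") =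
      (pvBnds caps m ++ [m + 1]).map (fun b => b - 1) := by
  intro m
  have h1 : (List.range (m + 2)).drop 1 = (List.range (m + 1)).map (· + 1) := by
    rw [List.range_succ_eq_map]
    rfl
  have h2 : ((List.range (m + 2)).drop 1).filter
      (fun j => j = m + 1 ∨ caps.getD j "" ≠ caps.getD (j - 1) "") =
      pvBnds caps m ++ [m + 1] := by
    rw [pvRange_drop_succ, List.filter_append]
    have hmem : ∀ j ∈ (List.range (m + 1)).drop 1,
        (decide (j = m + 1 ∨ caps.getD j "" ≠ caps.getD (j - 1) "") : Bool) =
        decide (caps.getD j "" ≠ caps.getD (j - 1) "") := by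
      intro j hj
      have : j < m + 1 := List.mem_range.mp (List.mem_of_mem_drop hj)
      have hne : j ≠ m + 1 := by omega
      apply decide_eq_decide.mpr
      constructor
      · rintro (h | h)
        · exact absurd h hne
        · exact h
      · exact Or.inr
    rw [List.filter_congr hmem]
    simp [pvBnds]
  have h3 : (fun i => (decide (i = m ∨ caps.getD (i + 1) "" ≠ caps.getD i "") : Bool)) =
      (fun i => decide (i + 1 = m + 1 ∨ caps.getD (i + 1) "" ≠ caps.getD (i + 1 - 1) "")) := by
    funext i
    apply decide_eq_decide.mpr
    constructor
    · rintro (h | h)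
      · exact Or.inl (by omega)
      · exact Or.inr (by simpa using h)
    · rintro (h | h)
      · exact Or.inl (by omega)
      · exact Or.inr (by simpa using h)
  have h4 : ((List.range (m + 1)).map (· + 1)).filter
      (fun j => j = m + 1 ∨ caps.getD j "" ≠ caps.getD (j - 1) "") =
      ((List.range (m + 1)).filter
        (fun i => i = m ∨ caps.getD (i + 1) "" ≠ caps.getD i "")).map (· + 1) := by
    rw [pvFilterMap]
    rw [h3]
  have h5 : ((List.range (m + 1)).filter
        (fun i => i = m ∨ caps.getD (i + 1) "" ≠ caps.getD i "")).map (· + 1) =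
      pvBnds caps m ++ [m + 1] := by
    rw [← h4, ← h1, h2]
  calc (List.range (m + 1)).filter (fun i => i = m ∨ caps.getD (i + 1) "" ≠ caps.getD i "")
      = (((List.range (m + 1)).filter
          (fun i => i = m ∨ caps.getD (i + 1) "" ≠ caps.getD i "")).map (· + 1)).map
          (fun b => b - 1) := by
        rw [List.map_map,
          show ((fun b : Nat => b - 1) ∘ fun x => x + 1) = id from funext fun x => by simp,
          List.map_id]
    _ = (pvBnds caps m ++ [m + 1]).map (fun b => b - 1) := by rw [h5]

-- segment structure: consecutive entries bound constant stretches of caps, up to n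
def pvChain (caps : List String) : List Nat → Nat → Prop
  | [], _ => True
  | [a], n => a < n ∧ ∀ i, a ≤ i → i < n → caps.getD i "" = caps.getD a ""
  | a :: b :: rest, n => a < b ∧ (∀ i, a ≤ i → i < b → caps.getD i "" = caps.getD a "")
      ∧ pvChain caps (b :: rest) n

theorem pvChain_extend (caps : List String) :
    ∀ (l : List Nat) (a n : Nat), pvChain caps (a :: l) n →
      caps.getD n "" = caps.getD (n - 1) "" → pvChain caps (a :: l) (n + 1) := by
  intro l
  induction l with
  | nil =>
    intro a n h hn
    obtain ⟨han, hseg⟩ := h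
    refine ⟨by omega, fun i hai hin => ?_⟩
    by_cases hi : i < n
    · exact hseg i hai hi
    · have : i = n := by omega
      rw [this, hn]
      exact hseg (n - 1) (by omega) (by omega)
  | cons b rest ih =>
    intro a n h hn
    obtain ⟨hab, hseg, hrec⟩ := h
    exact ⟨hab, hseg, ih b n hrec hn⟩

theorem pvChain_append (caps : List String) :
    ∀ (l : List Nat) (a n : Nat), pvChain caps (a :: l) n →
      pvChain caps ((a :: l) ++ [n]) (n + 1) := by
  intro l
  induction l with
  | nil =>
    intro a n h
    obtain ⟨han, hseg⟩ := h
    exact ⟨han, hseg, by omega, fun i hni hin => by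
      have : i = n := by omega
      rw [this]⟩
  | cons b rest ih =>
    intro a n h
    obtain ⟨hab, hseg, hrec⟩ := h
    exact ⟨hab, hseg, ih b n hrec⟩

theorem pvChainMain (caps : List String) : ∀ k : Nat, pvChain caps (0 :: pvBnds caps k) (k + 1) := by
  intro k
  induction k with
  | zero =>
    have : pvBnds caps 0 = [] := by simp [pvBnds, List.range_one]
    rw [this]
    exact ⟨Nat.zero_lt_one, fun i h0 h1 => by
      have : i = 0 := by omega
      rw [this]⟩
  | succ k ih =>
    rw [pvBnds_succ]
    by_cases h : caps.getD (k + 1) "" = caps.getD k ""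
    · rw [if_neg (not_not_intro h), List.append_nil]
      exact pvChain_extend caps _ 0 (k + 1) ih (by simpa using h)
    · rw [if_pos (by simpa using h)]
      exact pvChain_append caps _ 0 (k + 1) ih

-- the two emissions agree: A's fold over intervals vs B's map over zipped starts/ends
theorem pvZip (caps : List String) (flip : String) :
    ∀ (l : List Nat) (a n : Nat) (acc : List String), pvChain caps (a :: l) n →
      (pvIvals caps ((a :: l) ++ [n])).foldl (pvEmitA flip) acc =
        acc ++ (((a :: l).filter (fun s => caps.getD s "" = flip)).zip
          (((l ++ [n]).filter (fun b => caps.getD (b - 1) "" = flip)).map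
            (fun b => b - 1))).map pvFmt := by
  intro l
  induction l with
  | nil =>
    intro a n acc h
    obtain ⟨han, hseg⟩ := h
    have hconst : caps.getD (n - 1) "" = caps.getD a "" := hseg (n - 1) (by omega) (by omega)
    show pvEmitA flip acc (a, n - 1, caps.getD a "") = _
    by_cases hf : caps.getD a "" = flip
    · have hf' : caps[a]?.getD "" = flip := hf
      have hfn : caps[n-1]?.getD "" = flip := hconst.trans hf
      unfold pvEmitA pvFmt
      by_cases he : a = n - 1 <;> simp [hf', hfn, he]
    · have hf' : ¬ caps[a]?.getD "" = flip := hf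
      have hfn : ¬ caps[n-1]?.getD "" = flip := fun hc => hf (hconst.symm.trans hc)
      unfold pvEmitA
      simp [hf', hfn]
  | cons b rest ih =>
    intro a n acc h
    obtain ⟨hab, hseg, hrec⟩ := h
    have hconst : caps.getD (b - 1) "" = caps.getD a "" := hseg (b - 1) (by omega) (by omega)
    show ((a, b - 1, caps.getD a "") :: pvIvals caps ((b :: rest) ++ [n])).foldl
        (pvEmitA flip) acc = _
    rw [List.foldl_cons]
    by_cases hf : caps.getD a "" = flip
    · have hf' : caps[a]?.getD "" = flip := hf
      have hfb : caps[b-1]?.getD "" = flip := hconst.trans hf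
      have hstep : pvEmitA flip acc (a, b - 1, caps.getD a "") = acc ++ [pvFmt (a, b - 1)] := by
        unfold pvEmitA pvFmt
        by_cases he : a = b - 1 <;> simp [hf', hfb, he]
      rw [hstep, ih b n (acc ++ [pvFmt (a, b - 1)]) hrec]
      simp [hf', hfb, List.append_assoc]
    · have hf' : ¬ caps[a]?.getD "" = flip := hf
      have hfb : ¬ caps[b-1]?.getD "" = flip := fun hc => hf (hconst.symm.trans hc)
      have hstep : pvEmitA flip acc (a, b - 1, caps.getD a "") = acc := by
        unfold pvEmitA
        simp [hf']
      rw [hstep, ih b n acc hrec]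
      simp [hf', hfb]

-- the flip direction both programs agree on, expressed through the boundary list
def pvFlip (caps : List String) (m : Nat) : String :=
  if ((0 :: pvBnds caps m).filter (fun s => caps.getD s "" = "F")).length <
      (0 :: pvBnds caps m).length -
        ((0 :: pvBnds caps m).filter (fun s => caps.getD s "" = "F")).length
  then "F" else "B"

-- generic: filter of a conjunction = staged filters
theorem pvFilterAnd (p q : Nat → Bool) :
    ∀ l : List Nat, l.filter (fun i => p i && q i) = (l.filter p).filter q := by
  intro l
  induction l with
  | nil => rfl
  | cons x xs ih =>
    by_cases hp : p x <;> by_cases hq : q x <;> simp [hp, hq, ih]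

theorem pvA_eq (caps : List String) (m : Nat) (hm : caps.length = m + 1) :
    please_flip_original caps =
      (pvIvals caps ((0 :: pvBnds caps m) ++ [m + 1])).foldl (pvEmitA (pvFlip caps m)) [] := by
  obtain ⟨hfold, _⟩ := pvLoopA caps m
  unfold please_flip_original
  simp only [hm, hfold]
  rw [pvIvals_append caps (pvBnds caps m) 0 (m + 1)]
  have hdec := pvLast_decomp 0 (pvBnds caps m)
  unfold pvFlip
  by_cases hf : caps.getD (pvLast 0 (pvBnds caps m)) "" = "F"
  · have hf' : caps[pvLast 0 (pvBnds caps m)]?.getD "" = "F" := hf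
    have hFcnt : ((0 :: pvBnds caps m).filter (fun s => caps.getD s "" = "F")).length
        = ((0 :: pvBnds caps m).dropLast.filter (fun s => caps.getD s "" = "F")).length + 1 := by
      conv_lhs => rw [hdec]
      simp [List.filter_append, hf']
    have hNcnt : ((0 :: pvBnds caps m).length
          - ((0 :: pvBnds caps m).filter (fun s => caps.getD s "" = "F")).length)
        = ((0 :: pvBnds caps m).dropLast.filter (fun s => ¬ (caps.getD s "" = "F"))).length := by
      have h1 := pvFilter_split caps (0 :: pvBnds caps m)
      have h2 : ((0 :: pvBnds caps m).filter (fun s => ¬ (caps.getD s "" = "F"))).length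
          = ((0 :: pvBnds caps m).dropLast.filter
              (fun s => ¬ (caps.getD s "" = "F"))).length := by
        conv_lhs => rw [hdec]
        simp [List.filter_append, hf']
      omega
    rw [if_pos hf, if_pos hf]
    have hc : (((0 :: pvBnds caps m).dropLast.filter (fun s => caps.getD s "" = "F")).length + 1 <
          ((0 :: pvBnds caps m).dropLast.filter (fun s => ¬ (caps.getD s "" = "F"))).length)
        = (((0 :: pvBnds caps m).filter (fun s => caps.getD s "" = "F")).length <
            (0 :: pvBnds caps m).length -
              ((0 :: pvBnds caps m).filter (fun s => caps.getD s "" = "F")).length) :=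
      propext (by omega)
    simp only [hc]
  · have hf' : ¬ caps[pvLast 0 (pvBnds caps m)]?.getD "" = "F" := hf
    have hFcnt : ((0 :: pvBnds caps m).filter (fun s => caps.getD s "" = "F")).length
        = ((0 :: pvBnds caps m).dropLast.filter (fun s => caps.getD s "" = "F")).length := by
      conv_lhs => rw [hdec]
      simp [List.filter_append, hf']
    have hNcnt : ((0 :: pvBnds caps m).length
          - ((0 :: pvBnds caps m).filter (fun s => caps.getD s "" = "F")).length)
        = ((0 :: pvBnds caps m).dropLast.filter
            (fun s => ¬ (caps.getD s "" = "F"))).length + 1 := by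
      have h1 := pvFilter_split caps (0 :: pvBnds caps m)
      have h2 : ((0 :: pvBnds caps m).filter (fun s => ¬ (caps.getD s "" = "F"))).length
          = ((0 :: pvBnds caps m).dropLast.filter
              (fun s => ¬ (caps.getD s "" = "F"))).length + 1 := by
        conv_lhs => rw [hdec]
        simp [List.filter_append, hf']
      omega
    rw [if_neg hf, if_neg hf]
    have hc : (((0 :: pvBnds caps m).dropLast.filter (fun s => caps.getD s "" = "F")).length <
          ((0 :: pvBnds caps m).dropLast.filter (fun s => ¬ (caps.getD s "" = "F"))).length + 1)
        = (((0 :: pvBnds caps m).filter (fun s => caps.getD s "" = "F")).length <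
            (0 :: pvBnds caps m).length -
              ((0 :: pvBnds caps m).filter (fun s => caps.getD s "" = "F")).length) :=
      propext (by omega)
    simp only [hc]

theorem pvAlt_eq (caps : List String) (m : Nat) (hm : caps.length = m + 1) :
    please_flip_original_alt caps =
      (((0 :: pvBnds caps m).filter (fun s => caps.getD s "" = pvFlip caps m)).zip
        (((pvBnds caps m ++ [m + 1]).filter
            (fun b => caps.getD (b - 1) "" = pvFlip caps m)).map (fun b => b - 1))).map pvFmt := by
  unfold please_flip_original_alt
  simp only [hm, Nat.add_sub_cancel]
  have hfw : (List.range (m + 1)).filter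
      (fun i => (i = 0 ∨ caps.getD i "" ≠ caps.getD (i - 1) "") ∧ caps.getD i "" = "F")
      = (0 :: pvBnds caps m).filter (fun s => caps.getD s "" = "F") := by
    rw [show (fun i => decide ((i = 0 ∨ caps.getD i "" ≠ caps.getD (i - 1) "")
          ∧ caps.getD i "" = "F"))
        = (fun i => decide (i = 0 ∨ caps.getD i "" ≠ caps.getD (i - 1) "")
            && decide (caps.getD i "" = "F")) from funext fun i => Bool.decide_and _ _]
    rw [pvFilterAnd, pvStarts]
  rw [hfw, pvStarts]
  have hflip : (if ((0 :: pvBnds caps m).filter (fun s => caps.getD s "" = "F")).length <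
      (0 :: pvBnds caps m).length -
        ((0 :: pvBnds caps m).filter (fun s => caps.getD s "" = "F")).length
    then "F" else "B") = pvFlip caps m := rfl
  rw [hflip]
  have hst : (List.range (m + 1)).filter
      (fun i => caps.getD i "" = pvFlip caps m ∧ (i = 0 ∨ caps.getD (i - 1) "" ≠ pvFlip caps m))
      = (0 :: pvBnds caps m).filter (fun s => caps.getD s "" = pvFlip caps m) := by
    rw [show (fun i => decide (caps.getD i "" = pvFlip caps m
          ∧ (i = 0 ∨ caps.getD (i - 1) "" ≠ pvFlip caps m)))
        = (fun i => decide (i = 0 ∨ caps.getD i "" ≠ caps.getD (i - 1) "")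
            && decide (caps.getD i "" = pvFlip caps m)) from funext fun i => by
      rw [← Bool.decide_and]
      apply decide_eq_decide.mpr
      constructor
      · rintro ⟨hfi, h0 | hd⟩
        · exact ⟨Or.inl h0, hfi⟩
        · exact ⟨Or.inr (fun he => hd (he.symm.trans hfi)), hfi⟩
      · rintro ⟨h0 | hd, hfi⟩
        · exact ⟨hfi, Or.inl h0⟩
        · exact ⟨hfi, Or.inr (fun he => hd (hfi.trans he.symm))⟩]
    rw [pvFilterAnd, pvStarts]
  have hen : (List.range (m + 1)).filter
      (fun i => caps.getD i "" = pvFlip caps m ∧ (i = m ∨ caps.getD (i + 1) "" ≠ pvFlip caps m))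
      = ((pvBnds caps m ++ [m + 1]).filter
          (fun b => caps.getD (b - 1) "" = pvFlip caps m)).map (fun b => b - 1) := by
    rw [show (fun i => decide (caps.getD i "" = pvFlip caps m
          ∧ (i = m ∨ caps.getD (i + 1) "" ≠ pvFlip caps m)))
        = (fun i => decide (i = m ∨ caps.getD (i + 1) "" ≠ caps.getD i "")
            && decide (caps.getD i "" = pvFlip caps m)) from funext fun i => by
      rw [← Bool.decide_and]
      apply decide_eq_decide.mpr
      constructor
      · rintro ⟨hfi, h0 | hd⟩
        · exact ⟨Or.inl h0, hfi⟩
        · exact ⟨Or.inr (fun he => hd (he.trans hfi)), hfi⟩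
      · rintro ⟨h0 | hd, hfi⟩
        · exact ⟨hfi, Or.inl h0⟩
        · exact ⟨hfi, Or.inr (fun he => hd (he.trans hfi.symm))⟩]
    rw [pvFilterAnd, pvEnds, pvFilterMap]
  rw [hst, hen]

theorem pvMain (caps : List String) (h : caps ≠ []) :
    please_flip_original caps = please_flip_original_alt caps := by
  obtain ⟨m, hm⟩ : ∃ m, caps.length = m + 1 :=
    ⟨caps.length - 1, by cases caps with | nil => exact absurd rfl h | cons a l => simp⟩
  rw [pvA_eq caps m hm, pvAlt_eq caps m hm,
    pvZip caps (pvFlip caps m) (pvBnds caps m) 0 (m + 1) [] (pvChainMain caps m)]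
  rfl

-- ===== VERDICT (by name: the statement is the Claim_ definition above) =====
theorem please_flip_original_spec : Claim_equal_please_flip_original := by
  intro caps _ hpre
  exact pvMain caps hpre
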